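-- pv_equiv track=rewrite | github.com/A1isuru/Labs | lab10_3.py | find_longest_sequence_row
-- ===== SOURCE A (Python) =====
-- def find_longest_sequence_row(table):
--     max_length = 0
--     max_row_index = -1
--
--     for row_index, row in enumerate(table):
--         current_length = 1
--         max_current_length = 1
--
--         for i in range(1, len(row)):
--             if row[i] == row[i - 1]:
--                 current_length += 1
--             else:
--                 current_length = 1
--
--             max_current_length = max(max_current_length, current_length)
--
--         if max_current_length > max_length:
--             max_length = max_current_length
--             max_row_index = row_index
--
--     return max_row_index
-- ===== SOURCE B (Python) =====
-- def _longest_run(row):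
--     # group the row into (value, count) runs, then take the largest count
--     runs = []
--     for x in row:
--         if runs and runs[-1][0] == x:
--             runs[-1] = (x, runs[-1][1] + 1)
--         else:
--             runs.append((x, 1))
--     return max((c for _, c in runs), default=1)
--
--
-- def find_longest_sequence_row(table):
--     if not table:
--         return -1
--     lengths = [_longest_run(row) for row in table]
--     return lengths.index(max(lengths))
-- ===== Notes on version B (the rewrite author's own statement) =====
-- stated objective: alternative
-- what changed: Per row, B groups the elements into (value, count) runs and takes the largest count (groupby-style), then builds the whole list of row scores and returns the first index of its maximum via max+index, instead of A's nested index loop with running current/max counters and an inline running argmax.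
import Mathlib
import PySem

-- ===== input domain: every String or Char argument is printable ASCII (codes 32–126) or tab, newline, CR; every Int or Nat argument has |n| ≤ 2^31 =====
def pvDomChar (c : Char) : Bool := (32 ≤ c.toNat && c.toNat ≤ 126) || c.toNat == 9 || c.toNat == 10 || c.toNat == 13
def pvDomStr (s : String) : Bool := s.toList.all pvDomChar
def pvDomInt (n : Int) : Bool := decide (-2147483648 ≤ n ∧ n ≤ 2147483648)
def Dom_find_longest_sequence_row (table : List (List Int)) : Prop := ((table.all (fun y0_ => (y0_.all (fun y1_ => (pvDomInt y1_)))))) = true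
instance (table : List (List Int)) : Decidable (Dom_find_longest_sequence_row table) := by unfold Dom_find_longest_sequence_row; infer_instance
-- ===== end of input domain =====

-- B groups each row into (value, count) runs and argmaxes the list of row scores via max+index,
-- instead of A's nested index loop with running counters and an inline running argmax ('alternative').

-- ===== PORT A =====
-- inner loop of A (for i in range(1, len(row)): ...), state (current_length, max_current_length)
def pvInnerA (row : List Int) : Int × Int :=
  (PySem.List.pyRange 1 (PySem.List.len row) 1).foldl
    (fun (q : Int × Int) i =>
      let cur := if PySem.List.pyGetD row i 0 = PySem.List.pyGetD row (i - 1) 0 then q.1 + 1 else 1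
      (cur, max q.2 cur)) (1, 1)

def find_longest_sequence_row (table : List (List Int)) : Int :=
  ((PySem.List.enumerate table 0).foldl
    (fun (st : Int × Int) p =>
      let mcl := (pvInnerA p.2).2
      if mcl > st.1 then (mcl, p.1) else st)
    (0, -1)).2

-- ===== PORT B =====
-- one step of B's run grouping: extend the last (value, count) run or start a new one
def pvStepRun (runs : List (Int × Int)) (x : Int) : List (Int × Int) :=
  match runs.getLast? with
  | some r => if r.1 = x then runs.dropLast ++ [(x, r.2 + 1)] else runs ++ [(x, 1)]
  | none => runs ++ [(x, 1)]

def pvLongestRun (row : List Int) : Int :=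
  PySem.List.maxD ((row.foldl pvStepRun []).map (·.2)) (fun c => c) 1

def find_longest_sequence_row_alt (table : List (List Int)) : Int :=
  if table = [] then -1
  else
    let lengths := table.map pvLongestRun
    -- lengths is nonempty and max(lengths) occurs in it, so neither fallback 0 is ever read
    let m := PySem.List.maxD lengths (fun v => v) 0
    ((PySem.List.index? lengths m).getD 0 : Nat)

-- ===== PRECONDITION & SPEC =====
def Spec_find_longest_sequence_row (table : List (List Int)) (out : Int) : Prop := out = find_longest_sequence_row_alt table
instance (table : List (List Int)) (out : Int) : Decidable (Spec_find_longest_sequence_row table out) := by unfold Spec_find_longest_sequence_row; infer_instance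

-- ===== CLAIM (what is proved, stated in full; the proofs are below) =====
def Claim_equal_find_longest_sequence_row : Prop := ∀ (table : List (List Int)), Dom_find_longest_sequence_row table → Spec_find_longest_sequence_row table (find_longest_sequence_row table)

-- ===== LEMMAS AND PROOFS =====

-- A's inner step, viewed on the pair (row[i-1], row[i])
def pvStepPair (q : Int × Int) (p : Int × Int) : Int × Int :=
  let cur := if p.2 = p.1 then q.1 + 1 else 1
  (cur, max q.2 cur)

lemma pv_range_pairs (xs : List Int) (x : Int) (init : Int × Int) :
    (List.range xs.length).foldl
      (fun q k => pvStepPair q ((x :: xs).getD k 0, (x :: xs).getD (k + 1) 0)) init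
    = ((x :: xs).zip xs).foldl pvStepPair init := by
  induction xs generalizing x init with
  | nil => simp
  | cons y ys ih =>
    rw [List.length_cons, List.range_succ_eq_map, List.foldl_cons, List.foldl_map]
    simp only [List.getD_cons_zero, List.getD_cons_succ, List.zip_cons_cons, List.foldl_cons]
    exact ih y _

lemma pv_bridge (row : List Int) :
    pvInnerA row = (row.zip row.tail).foldl pvStepPair (1, 1) := by
  cases row with
  | nil => simp [pvInnerA]
  | cons x xs =>
    unfold pvInnerA
    rw [PySem.List.pyRange_one]
    have hlen : ((PySem.List.len (x :: xs)) - 1).toNat = xs.length := by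
      simp [PySem.List.len_eq]
    rw [hlen, List.foldl_map]
    have hfun : (fun (q : Int × Int) (k : Nat) =>
        (fun (q : Int × Int) (i : Int) =>
          let cur := if PySem.List.pyGetD (x :: xs) i 0 = PySem.List.pyGetD (x :: xs) (i - 1) 0 then q.1 + 1 else 1
          (cur, max q.2 cur)) q (1 + (k : Int)))
        = fun q k => pvStepPair q ((x :: xs).getD k 0, (x :: xs).getD (k + 1) 0) := by
      funext q k
      have h1 : (1 : Int) + (k : Int) = ((k + 1 : Nat) : Int) := by push_cast; ring
      have h2 : (1 : Int) + (k : Int) - 1 = ((k : Nat) : Int) := by omega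
      simp only [h1, show ((k + 1 : Nat) : Int) - 1 = ((k : Nat) : Int) by push_cast; ring, PySem.List.pyGetD_natCast, pvStepPair]
    rw [hfun, pv_range_pairs]
    simp

lemma pv_maxD_concat (S : List Int) (c : Int) (hc : 1 ≤ c) :
    PySem.List.maxD (S ++ [c]) (fun v => v) 1 = max (PySem.List.maxD S (fun v => v) 1) c := by
  cases S with
  | nil => simp [PySem.List.maxD, PySem.List.max?]; omega
  | cons a t =>
    simp [PySem.List.maxD, PySem.List.max?_id_cons, List.foldl_append]

lemma pv_one_le_maxD (S : List Int) (h : ∀ v ∈ S, 1 ≤ v) :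
    1 ≤ PySem.List.maxD S (fun v => v) 1 := by
  cases S with
  | nil => simp [PySem.List.maxD, PySem.List.max?]
  | cons a t =>
    simp only [PySem.List.maxD, PySem.List.max?_id_cons, Option.getD_some]
    have := (PySem.List.le_foldl_max t a).1
    have ha := h a (by simp)
    omega

lemma pv_inv (xs : List Int) (x cur mx : Int) (R : List (Int × Int))
    (hlast : R.getLast? = some (x, cur))
    (hmx : mx = PySem.List.maxD (R.map (·.2)) (fun c => c) 1)
    (hpos : ∀ p ∈ R, 1 ≤ p.2) :
    (((x :: xs).zip xs).foldl pvStepPair (cur, mx)).2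
    = PySem.List.maxD ((xs.foldl pvStepRun R).map (·.2)) (fun c => c) 1 := by
  induction xs generalizing x cur mx R with
  | nil => simpa using hmx
  | cons y ys ih =>
    have hRne : R ≠ [] := by intro h; rw [h] at hlast; simp at hlast
    have hRsplit : R.dropLast ++ [(x, cur)] = R := by
      have := List.dropLast_concat_getLast hRne
      rwa [List.getLast_eq_iff_getLast?_eq_some hRne |>.2 hlast] at this
    have hcur : 1 ≤ cur := hpos (x, cur) (by rw [← hRsplit]; simp)
    have hmapR : R.map (·.2) = R.dropLast.map (·.2) ++ [cur] := by
      rw [← hRsplit]; simp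
    simp only [List.zip_cons_cons, List.foldl_cons]
    by_cases hxy : y = x
    · have hstepA : pvStepPair (cur, mx) (x, y) = (cur + 1, max mx (cur + 1)) := by
        simp [pvStepPair, hxy]
      have hstepB : pvStepRun R y = R.dropLast ++ [(y, cur + 1)] := by
        unfold pvStepRun; rw [hlast]; exact if_pos hxy.symm
      rw [hstepA, hstepB]
      apply ih
      · simp
      · rw [hmapR, pv_maxD_concat _ _ hcur] at hmx
        have h1 : (R.dropLast ++ [(y, cur + 1)]).map (·.2) = R.dropLast.map (·.2) ++ [cur + 1] :=
          List.map_append ..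
        rw [h1, pv_maxD_concat _ _ (by omega), hmx]
        omega
      · intro p hp
        rcases List.mem_append.1 hp with h | h
        · exact hpos p (by rw [← hRsplit]; exact List.mem_append_left _ h)
        · simp at h; subst h; omega
    · have hmx1 : 1 ≤ mx := by
        rw [hmx]
        apply pv_one_le_maxD
        intro v hv
        rcases List.mem_map.1 hv with ⟨p, hp, hv2⟩
        rw [← hv2]; exact hpos p hp
      have hstepA : pvStepPair (cur, mx) (x, y) = (1, max mx 1) := by
        simp [pvStepPair, hxy]
      have hstepB : pvStepRun R y = R ++ [(y, 1)] := by
        unfold pvStepRun; rw [hlast]; exact if_neg (fun h => hxy h.symm)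
      rw [hstepA, hstepB]
      apply ih
      · simp
      · have h1 : (R ++ [(y, 1)]).map (fun p : Int × Int => p.2) = R.map (fun p : Int × Int => p.2) ++ [1] := List.map_append ..
        rw [h1, pv_maxD_concat _ _ (by omega), ← hmx]
      · intro p hp
        rcases List.mem_append.1 hp with h | h
        · exact hpos p h
        · simp at h; subst h; omega

lemma pv_runs_pos (xs : List Int) (R : List (Int × Int)) (h : ∀ p ∈ R, 1 ≤ p.2) :
    ∀ p ∈ xs.foldl pvStepRun R, 1 ≤ p.2 := by
  induction xs generalizing R with
  | nil => simpa using h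
  | cons y ys ih =>
    rw [List.foldl_cons]
    apply ih
    intro p hp
    rcases hR : R.getLast? with _ | r
    · have he : pvStepRun R y = R ++ [(y, 1)] := by unfold pvStepRun; rw [hR]
      rw [he] at hp
      rcases List.mem_append.1 hp with h2 | h2
      · exact h p h2
      · simp at h2; subst h2; omega
    · by_cases hr : r.1 = y
      · have he : pvStepRun R y = R.dropLast ++ [(y, r.2 + 1)] := by
          unfold pvStepRun; rw [hR]; exact if_pos hr
        rw [he] at hp
        rcases List.mem_append.1 hp with h2 | h2
        · exact h p ((List.dropLast_sublist (l := R)).subset h2)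
        · simp at h2; subst h2
          have : 1 ≤ r.2 := h r (List.mem_of_getLast? hR)
          simp; omega
      · have he : pvStepRun R y = R ++ [(y, 1)] := by
          unfold pvStepRun; rw [hR]; exact if_neg hr
        rw [he] at hp
        rcases List.mem_append.1 hp with h2 | h2
        · exact h p h2
        · simp at h2; subst h2; omega

lemma pv_row (row : List Int) : (pvInnerA row).2 = pvLongestRun row := by
  rw [pv_bridge]
  cases row with
  | nil => simp [pvLongestRun, PySem.List.maxD, PySem.List.max?]
  | cons x xs =>
    have h0 : (x :: xs).foldl pvStepRun [] = xs.foldl pvStepRun [(x, 1)] := by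
      rw [List.foldl_cons]; rfl
    rw [show (x :: xs).tail = xs from rfl, pvLongestRun, h0]
    exact pv_inv xs x 1 1 [(x, 1)] (by simp) (by simp [PySem.List.maxD, PySem.List.max?]) (by simp)

lemma pv_row_pos (row : List Int) : 1 ≤ pvLongestRun row := by
  unfold pvLongestRun
  apply pv_one_le_maxD
  intro v hv
  rcases List.mem_map.1 hv with ⟨p, hp, hv2⟩
  rw [← hv2]
  exact pv_runs_pos row [] (by simp) p hp

lemma pv_argmax {α : Type} (xs : List α) (g : α → Int) (s ml mi : Int) :
    ((PySem.List.enumerate xs s).foldl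
        (fun (st : Int × Int) p => if g p.2 > st.1 then (g p.2, p.1) else st) (ml, mi)).2
    = if _h : ∃ y ∈ xs, ml < g y
      then s + (((PySem.List.index? (xs.map g) ((xs.map g).foldl max ml)).getD 0 : Nat) : Int)
      else mi := by
  induction xs generalizing s ml mi with
  | nil => simp [PySem.List.enumerate_nil]
  | cons a t ih =>
    rw [PySem.List.enumerate_cons, List.foldl_cons]
    by_cases hga : g a > ml
    · rw [if_pos hga, ih]
      have hh : ∃ y ∈ a :: t, ml < g y := ⟨a, by simp, hga⟩
      rw [dif_pos hh]
      have hM : ((a :: t).map g).foldl max ml = (t.map g).foldl max (g a) := by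
        simp [max_eq_right (le_of_lt hga)]
      rw [hM]
      by_cases h' : ∃ y ∈ t, g a < g y
      · rw [dif_pos h']
        rcases h' with ⟨y0, hy0, hgy0⟩
        set F := (t.map g).foldl max (g a) with hF
        have hFy : g y0 ≤ F := (PySem.List.le_foldl_max (t.map g) (g a)).2 _ (List.mem_map_of_mem hy0)
        have hne : g a ≠ F := by omega
        have hFmem : F ∈ t.map g := by
          rcases PySem.List.foldl_max_mem (t.map g) (g a) with h | h
          · omega
          · exact h
        rw [List.map_cons, PySem.List.index?_cons_of_ne _ hne]
        rcases Option.isSome_iff_exists.1 ((PySem.List.index?_isSome_iff (xs := t.map g) (v := F)).2 hFmem) with ⟨k, hk⟩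
        rw [hk]
        simp only [Option.map_some, Option.getD_some]
        push_cast
        ring
      · rw [dif_neg h']
        have hFa : (t.map g).foldl max (g a) = g a := by
          rcases PySem.List.foldl_max_mem (t.map g) (g a) with h | h
          · exact h
          · rcases List.mem_map.1 h with ⟨y0, hy0, hv⟩
            have h1 : g y0 ≤ g a := by
              by_contra hc
              exact h' ⟨y0, hy0, by omega⟩
            have h2 := (PySem.List.le_foldl_max (t.map g) (g a)).1
            omega
        rw [hFa, List.map_cons, PySem.List.index?_cons_self]
        simp
    · rw [if_neg hga, ih]
      have hgale : g a ≤ ml := by omega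
      have hiff : (∃ y ∈ a :: t, ml < g y) ↔ (∃ y ∈ t, ml < g y) := by
        constructor
        · rintro ⟨y0, hy0, hgy0⟩
          rcases List.mem_cons.1 hy0 with rfl | hy0'
          · omega
          · exact ⟨y0, hy0', hgy0⟩
        · rintro ⟨y0, hy0, hgy0⟩
          exact ⟨y0, List.mem_cons_of_mem _ hy0, hgy0⟩
      by_cases h' : ∃ y ∈ t, ml < g y
      · rw [dif_pos (hiff.2 h'), dif_pos h']
        have hM : ((a :: t).map g).foldl max ml = (t.map g).foldl max ml := by
          simp [max_eq_left hgale]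
        rw [hM]
        set F := (t.map g).foldl max ml with hF
        rcases h' with ⟨y0, hy0, hgy0⟩
        have hFy : g y0 ≤ F := (PySem.List.le_foldl_max (t.map g) ml).2 _ (List.mem_map_of_mem hy0)
        have hne : g a ≠ F := by omega
        have hFmem : F ∈ t.map g := by
          rcases PySem.List.foldl_max_mem (t.map g) ml with h | h
          · omega
          · exact h
        rw [List.map_cons, PySem.List.index?_cons_of_ne _ hne]
        rcases Option.isSome_iff_exists.1 ((PySem.List.index?_isSome_iff (xs := t.map g) (v := F)).2 hFmem) with ⟨k, hk⟩
        rw [hk]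
        simp only [Option.map_some, Option.getD_some]
        push_cast
        ring
      · rw [dif_neg (fun hh => h' (hiff.1 hh)), dif_neg h']

-- ===== VERDICT (by name: the statement is the Claim_ definition above) =====
theorem find_longest_sequence_row_spec : Claim_equal_find_longest_sequence_row := by
  intro table _
  show find_longest_sequence_row table = find_longest_sequence_row_alt table
  unfold find_longest_sequence_row
  simp only [pv_row]
  rw [pv_argmax table pvLongestRun 0 0 (-1)]
  cases table with
  | nil =>
    rw [dif_neg (by simp)]
    simp [find_longest_sequence_row_alt]
  | cons r rs =>
    have hr := pv_row_pos r
    rw [dif_pos ⟨r, by simp, by omega⟩]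
    unfold find_longest_sequence_row_alt
    rw [if_neg (by simp)]
    simp only [List.map_cons, List.foldl_cons, PySem.List.maxD, PySem.List.max?_id_cons, Option.getD_some]
    rw [max_eq_right (by omega : (0:Int) ≤ pvLongestRun r)]
    omega
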